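-- pv_equiv track=rewrite | github.com/DevAndrewGx/AI-PROYECTO-TIENDA-AURELION | leer_documentacion.py | extraer_secciones
-- ===== SOURCE A (Python) =====
-- def extraer_secciones(contenido):
--     """
--     Extrae secciones del Markdown basado en headers de nivel 1.
--     Retorna una lista ordenada de diccionarios con 'titulo' y 'contenido'.
--     """
--     secciones = []
--     lineas = contenido.split('\n')
--     seccion_actual = None
--     contenido_seccion = []
--
--     for linea in lineas:
--         if linea.startswith('# '):  # Header nivel 1
--             if seccion_actual:
--                 secciones.append({'titulo': seccion_actual, 'contenido': '\n'.join(contenido_seccion).strip()})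
--             seccion_actual = linea[2:].strip()  # Remover '# '
--             contenido_seccion = [linea]
--         else:
--             if seccion_actual:
--                 contenido_seccion.append(linea)
--
--     # Agregar la última sección
--     if seccion_actual:
--         secciones.append({'titulo': seccion_actual, 'contenido': '\n'.join(contenido_seccion).strip()})
--
--     return secciones
-- ===== SOURCE B (Python) =====
-- def extraer_secciones(contenido):
--     # Two-pass: first partition the lines into blocks at level-1 headers
--     # (lines before the first header are dropped), then build the dicts,
--     # keeping only blocks whose stripped title is non-empty.
--     bloques = []
--     for linea in contenido.split('\n'):
--         if linea.startswith('# '):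
--             bloques.append([linea])
--         elif bloques:
--             bloques[-1].append(linea)
--     resultado = []
--     for bloque in bloques:
--         titulo = bloque[0][2:].strip()
--         if titulo:
--             resultado.append({'titulo': titulo, 'contenido': '\n'.join(bloque).strip()})
--     return resultado
-- ===== Notes on version B (the rewrite author's own statement) =====
-- stated objective: simpler
-- what changed: Replaces A's single loop with interleaved finalize-and-emit state (current title, pending buffer, conditional flushes) by two separate passes: one partition pass that groups lines into header-started blocks, then a mapping pass that builds a dict per block whose stripped title is non-empty.
import Mathlib
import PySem

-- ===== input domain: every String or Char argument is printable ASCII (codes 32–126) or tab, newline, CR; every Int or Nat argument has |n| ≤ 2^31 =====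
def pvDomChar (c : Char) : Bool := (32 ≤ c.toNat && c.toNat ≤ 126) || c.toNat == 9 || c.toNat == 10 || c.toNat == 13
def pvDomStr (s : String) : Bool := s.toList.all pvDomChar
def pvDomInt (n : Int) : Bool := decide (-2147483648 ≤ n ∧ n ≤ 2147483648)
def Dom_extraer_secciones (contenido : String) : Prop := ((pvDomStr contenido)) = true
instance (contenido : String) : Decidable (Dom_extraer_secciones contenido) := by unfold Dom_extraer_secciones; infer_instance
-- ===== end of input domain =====

-- B re-implements A as two separate passes (partition into header-delimited blocks, then build the dicts);
-- objective: simpler decomposition, same cost. Return values proved equal on all inputs.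

-- ===== PORT A =====
-- Python truthiness of the Optional[str] variable `seccion_actual` (`if seccion_actual:`)
def pyTruthy (o : Option String) : Bool :=
  match o with
  | none => false
  | some s => !(s == "")

-- {'titulo': t, 'contenido': '\n'.join(b).strip()}
def pvDict (t : String) (b : List String) : List (String × String) :=
  [("titulo", t), ("contenido", PySem.Str.strip (PySem.Str.join "\n" b))]

-- the body of A's for-loop, state = (secciones, seccion_actual, contenido_seccion)
def pvStepA (s : List (List (String × String)) × Option String × List String) (linea : String) :
    List (List (String × String)) × Option String × List String :=
  if PySem.Str.startswith linea "# " then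
    ((if pyTruthy s.2.1 then s.1 ++ [pvDict (s.2.1.getD "") s.2.2] else s.1),
     some (PySem.Str.strip (PySem.Str.slice linea (some 2) none)),  -- linea[2:].strip()
     [linea])
  else
    (s.1, s.2.1, if pyTruthy s.2.1 then s.2.2 ++ [linea] else s.2.2)

-- the trailing "agregar la última sección" step
def pvFinishA (s : List (List (String × String)) × Option String × List String) :
    List (List (String × String)) :=
  if pyTruthy s.2.1 then s.1 ++ [pvDict (s.2.1.getD "") s.2.2] else s.1

def extraer_secciones (contenido : String) : List (List (String × String)) :=
  -- contenido.split('\n'): separator is non-empty, so split? is always `some`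
  let lineas := (PySem.Str.split? contenido "\n").getD []
  pvFinishA (lineas.foldl pvStepA ([], none, []))

-- ===== PORT B =====
-- pass 1 body: start a new block at '# ', else append to the last block if any
def pvStepB (bs : List (List String)) (linea : String) : List (List String) :=
  if PySem.Str.startswith linea "# " then bs ++ [[linea]]
  else if bs ≠ [] then bs.dropLast ++ [bs.getLastD [] ++ [linea]]  -- bloques[-1].append(linea)
  else bs

-- pass 2 body: emit the dict when the stripped title is non-empty
-- (blocks are never empty, so bloque[0] is read as headD "")
def pvEmitStep (res : List (List (String × String))) (bloque : List String) :
    List (List (String × String)) :=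
  if PySem.Str.strip (PySem.Str.slice (bloque.headD "") (some 2) none) ≠ "" then
    res ++ [pvDict (PySem.Str.strip (PySem.Str.slice (bloque.headD "") (some 2) none)) bloque]
  else res

def extraer_secciones_alt (contenido : String) : List (List (String × String)) :=
  let lineas := (PySem.Str.split? contenido "\n").getD []
  let bloques := lineas.foldl pvStepB []
  bloques.foldl pvEmitStep []

-- ===== PRECONDITION & SPEC =====
def Spec_extraer_secciones (contenido : String) (out : List (List (String × String))) : Prop := out = extraer_secciones_alt contenido
instance (contenido : String) (out : List (List (String × String))) : Decidable (Spec_extraer_secciones contenido out) := by unfold Spec_extraer_secciones; infer_instance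

-- ===== CLAIM (what is proved, stated in full; the proofs are below) =====
def Claim_equal_extraer_secciones : Prop := ∀ (contenido : String), Dom_extraer_secciones contenido → Spec_extraer_secciones contenido (extraer_secciones contenido)

-- ===== LEMMAS AND PROOFS =====

def pvEmit (bs : List (List String)) : List (List (String × String)) := bs.foldl pvEmitStep []

def pvTitle (b : List String) : String :=
  PySem.Str.strip (PySem.Str.slice (b.headD "") (some 2) none)

lemma pvEmit_init (l : List (List String)) :
    ∀ init, l.foldl pvEmitStep init = init ++ pvEmit l := by
  induction l with
  | nil => intro init; simp [pvEmit]
  | cons b l ih =>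
      intro init
      rw [List.foldl_cons, ih (pvEmitStep init b)]
      conv_rhs => rw [pvEmit, List.foldl_cons, ih (pvEmitStep [] b)]
      unfold pvEmitStep
      split_ifs <;> simp

lemma pvEmit_append (xs ys : List (List String)) :
    pvEmit (xs ++ ys) = pvEmit xs ++ pvEmit ys := by
  unfold pvEmit
  rw [List.foldl_append, pvEmit_init]
  rfl

lemma pvEmit_singleton (b : List String) :
    pvEmit [b] = if pvTitle b ≠ "" then [pvDict (pvTitle b) b] else [] := by
  simp [pvEmit, pvEmitStep, pvTitle]

-- loop invariant between A's state and B's block list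
def pvInv (secs : List (List (String × String))) (cur : Option String) (buf : List String)
    (bs : List (List String)) : Prop :=
  (cur = none ∧ secs = [] ∧ bs = []) ∨
  (∃ t bs' b, cur = some t ∧ bs = bs' ++ [b] ∧ b ≠ [] ∧ secs = pvEmit bs' ∧
      pvTitle b = t ∧ (t ≠ "" → b = buf))

lemma pvFinish_of_inv {secs cur buf bs} (h : pvInv secs cur buf bs) :
    pvFinishA (secs, cur, buf) = pvEmit bs := by
  rcases h with ⟨hc, hs, hb⟩ | ⟨t, bs', b, hc, hb, _, hs, ht, hbuf⟩
  · simp [pvFinishA, hc, hs, hb, pyTruthy, pvEmit]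
  · subst hc hb hs ht
    rw [pvEmit_append, pvEmit_singleton]
    by_cases h0 : pvTitle b = ""
    · simp [pvFinishA, pyTruthy, h0]
    · obtain rfl := hbuf h0
      simp [pvFinishA, pyTruthy, h0]

lemma pvInv_step {secs cur buf bs} (l : String) (h : pvInv secs cur buf bs) :
    pvInv (pvStepA (secs, cur, buf) l).1 (pvStepA (secs, cur, buf) l).2.1
      (pvStepA (secs, cur, buf) l).2.2 (pvStepB bs l) := by
  by_cases hsw : PySem.Chars.startswith l.toList ['#', ' '] = true
  · -- header line: A closes the pending section, B opens a new block
    have hsecs : (if pyTruthy cur then secs ++ [pvDict (cur.getD "") buf] else secs) = pvEmit bs := by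
      have := pvFinish_of_inv h
      simpa [pvFinishA] using this
    refine Or.inr ⟨PySem.Str.strip (PySem.Str.slice l (some 2) none), bs, [l], ?_, ?_, by simp, ?_, ?_, ?_⟩
    · simp [pvStepA, hsw]
    · simp [pvStepB, hsw]
    · simp [pvStepA, hsw, hsecs]
    · simp [pvTitle]
    · intro _; simp [pvStepA, hsw]
  · -- ordinary line
    rcases h with ⟨hc, hs, hb⟩ | ⟨t, bs', b, hc, hb, hne, hs, ht, hbuf⟩
    · subst hc hs hb
      exact Or.inl ⟨by simp [pvStepA, hsw, pyTruthy], by simp [pvStepA, hsw, pyTruthy], by simp [pvStepB, hsw]⟩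
    · subst hc hb hs ht
      refine Or.inr ⟨pvTitle b, bs', b ++ [l], ?_, ?_, by simp, ?_, ?_, ?_⟩
      · simp [pvStepA, hsw]
      · simp [pvStepB, hsw]
      · simp [pvStepA, hsw]
      · simp only [pvTitle]
        cases b with
        | nil => exact absurd rfl hne
        | cons x xs => simp
      · intro h0
        obtain rfl := hbuf h0
        simp [pvStepA, hsw, pyTruthy, h0]

lemma pvLoop (ls : List String) :
    ∀ secs cur buf bs, pvInv secs cur buf bs →
      pvFinishA (ls.foldl pvStepA (secs, cur, buf)) = pvEmit (ls.foldl pvStepB bs) := by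
  induction ls with
  | nil => intro secs cur buf bs h; simpa using pvFinish_of_inv h
  | cons l ls ih =>
      intro secs cur buf bs h
      have h' := pvInv_step l h
      simpa using ih _ _ _ _ h'

-- ===== VERDICT (by name: the statement is the Claim_ definition above) =====
theorem extraer_secciones_spec : Claim_equal_extraer_secciones := by
  intro contenido _
  unfold Spec_extraer_secciones extraer_secciones extraer_secciones_alt
  rw [← pvEmit]
  exact pvLoop _ [] none [] [] (Or.inl ⟨rfl, rfl, rfl⟩)
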